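-- pv_equiv track=rewrite | github.com/janith99hansidu/Hackerrank | 08-Angry Children 2/Angry_Children_2_dp.py | angryChildren
-- ===== SOURCE A (Python) =====
-- def angryChildren(k, packets):
--     n = len(packets)
--
--     # Sort the packets
--     packets.sort()
--
--     # Calculate prefix sums
--     prefix_sums = [0] * (n + 1)
--     for i in range(n):
--         prefix_sums[i + 1] = prefix_sums[i] + packets[i]
--
--     # Calculate initial unfairness
--     result = 0
--     dp = 0
--     for j in range(1, k):
--         dp += j * (packets[j] - packets[j - 1])
--         result += dp
--
--     # Sliding window to find the minimum unfairness
--     previous = result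
--     for i in range(1, n - k + 1):
--         previous += -2 * (prefix_sums[i + k - 1] - prefix_sums[i]) + (k - 1) * (packets[i + k - 1] + packets[i - 1])
--         result = min(result, previous)
--
--     return result
-- ===== SOURCE B (Python) =====
-- def angryChildren(k, packets):
--     # Sort the packets in place (same observable side effect as the original)
--     packets.sort()
--     n = len(packets)
--     # P[i] = sum of the first i packets, Q[i] = sum of j*packets[j] for j < i
--     P = [0]
--     Q = [0]
--     for i in range(n):
--         P.append(P[-1] + packets[i])
--         Q.append(Q[-1] + i * packets[i])
--     best = None
--     for s in range(n - k + 1):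
--         # unfairness of window [s, s+k) = sum_t (2t-(k-1))*packets[s+t], in closed form
--         u = 2 * (Q[s + k] - Q[s]) - (2 * s + k - 1) * (P[s + k] - P[s])
--         if best is None or u < best:
--             best = u
--     return 0 if best is None else best
-- ===== Notes on version B (the rewrite author's own statement) =====
-- stated objective: alternative
-- what changed: Replaces A's dp initialisation loop and incremental sliding-window recurrence by evaluating each window independently with the closed form 2*(Q[s+k]-Q[s]) - (2s+k-1)*(P[s+k]-P[s]) from two precomputed prefix arrays (element sums P and index-weighted sums Q), taking the minimum over window starts.
import Mathlib
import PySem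

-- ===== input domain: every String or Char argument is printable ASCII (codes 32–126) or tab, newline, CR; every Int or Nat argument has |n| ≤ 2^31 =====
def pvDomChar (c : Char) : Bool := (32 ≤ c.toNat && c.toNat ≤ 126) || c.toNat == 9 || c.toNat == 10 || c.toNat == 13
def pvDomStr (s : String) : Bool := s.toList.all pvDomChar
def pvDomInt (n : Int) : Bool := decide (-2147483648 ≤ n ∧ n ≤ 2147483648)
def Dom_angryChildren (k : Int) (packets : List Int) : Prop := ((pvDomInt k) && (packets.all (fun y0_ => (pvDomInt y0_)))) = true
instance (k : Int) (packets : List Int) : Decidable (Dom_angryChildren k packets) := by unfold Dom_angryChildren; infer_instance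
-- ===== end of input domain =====

-- B replaces A's prefix-sum + incremental sliding-window recurrence by a direct per-window
-- weighted sum Σ_t (2t-(k-1))·packets[s+t], minimised over all window starts (alternative, not faster).
-- In Python both A and B sort `packets` in place; the equivalence proved here is about the return value.

-- ===== PORT A =====
def angryChildren (k : Int) (packets : List Int) : Int :=
  let q := PySem.List.sorted packets (fun x => x) false
  let n : Int := q.length
  -- prefix_sums[i+1] = prefix_sums[i] + packets[i], built left to right
  let ps : List Int := (PySem.List.pyRange 0 n 1).foldl
      (fun ps i => ps ++ [PySem.List.pyGetD ps i 0 + PySem.List.pyGetD q i 0]) [0]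
  -- initial unfairness via the dp loop
  let rd : Int × Int := (PySem.List.pyRange 1 k 1).foldl
      (fun rd j =>
        let dp := rd.2 + j * (PySem.List.pyGetD q j 0 - PySem.List.pyGetD q (j - 1) 0)
        (rd.1 + dp, dp)) (0, 0)
  -- sliding window
  let rp : Int × Int := (PySem.List.pyRange 1 (n - k + 1) 1).foldl
      (fun rp i =>
        let prev := rp.2 + (-2) * (PySem.List.pyGetD ps (i + k - 1) 0 - PySem.List.pyGetD ps i 0)
          + (k - 1) * (PySem.List.pyGetD q (i + k - 1) 0 + PySem.List.pyGetD q (i - 1) 0)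
        (min rp.1 prev, prev)) (rd.1, rd.1)
  rp.1

-- ===== PORT B =====
def angryChildren_alt (k : Int) (packets : List Int) : Int :=
  let q := PySem.List.sorted packets (fun x => x) false
  let n : Int := q.length
  -- P[i] = sum of first i packets, Q[i] = sum of j*packets[j] for j < i
  let pq : List Int × List Int := (PySem.List.pyRange 0 n 1).foldl
      (fun pq i =>
        (pq.1 ++ [PySem.List.pyGetD pq.1 (-1) 0 + PySem.List.pyGetD q i 0],
         pq.2 ++ [PySem.List.pyGetD pq.2 (-1) 0 + i * PySem.List.pyGetD q i 0])) ([0], [0])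
  let best : Option Int := (PySem.List.pyRange 0 (n - k + 1) 1).foldl
      (fun best s =>
        let u := 2 * (PySem.List.pyGetD pq.2 (s + k) 0 - PySem.List.pyGetD pq.2 s 0)
          - (2 * s + k - 1) * (PySem.List.pyGetD pq.1 (s + k) 0 - PySem.List.pyGetD pq.1 s 0)
        match best with
        | none => some u
        | some b => some (if u < b then u else b)) none
  match best with
  | none => 0
  | some b => b

-- ===== PRECONDITION & SPEC =====
-- Pre_ excludes exactly the inputs on which A raises IndexError: k < 0, or k > len(packets)
-- (except the harmless k = 1 on an empty list, where both loops are empty and A returns 0).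
def Pre_angryChildren (k : Int) (packets : List Int) : Prop :=
  0 ≤ k ∧ (k ≤ (packets.length : Int) ∨ (k = 1 ∧ packets = []))
instance (k : Int) (packets : List Int) : Decidable (Pre_angryChildren k packets) := by
  unfold Pre_angryChildren; infer_instance

def pvWitness_angryChildren : Int × List Int := (2, [3, 1, 2])

def Spec_angryChildren (k : Int) (packets : List Int) (out : Int) : Prop := out = angryChildren_alt k packets
instance (k : Int) (packets : List Int) (out : Int) : Decidable (Spec_angryChildren k packets out) := by unfold Spec_angryChildren; infer_instance

-- ===== CLAIM (what is proved, stated in full; the proofs are below) =====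
def Claim_equal_angryChildren : Prop := ∀ (k : Int) (packets : List Int), Dom_angryChildren k packets → Pre_angryChildren k packets → Spec_angryChildren k packets (angryChildren k packets)
-- ===== LEMMAS AND PROOFS =====

-- Tk q i = sum of the first i entries of q; gq q t = q[t] (0 past the end).
def gq (q : List Int) (t : Nat) : Int := q.getD t 0
def Tk (q : List Int) : Nat → Int
  | 0 => 0
  | i + 1 => Tk q i + gq q i

-- weighted window sum: the unfairness of the window of size kk starting at s (for sorted q)
def wgen (q : List Int) (co : Int) (kk s : Nat) : Int :=
  ((List.range kk).map (fun t : Nat => (2 * (t : Int) - co) * gq q (s + t))).sum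
def wsum (q : List Int) (kk s : Nat) : Int := wgen q ((kk : Int) - 1) kk s
def ssum (q : List Int) (kk s : Nat) : Int :=
  ((List.range kk).map (fun t : Nat => gq q (s + t))).sum

lemma sum_map_sub {α : Type} (l : List α) (f g : α → Int) :
    (l.map (fun x => f x - g x)).sum = (l.map f).sum - (l.map g).sum := by
  induction l with
  | nil => simp
  | cons x xs ih => simp [ih]; ring

lemma ssum_eq (q : List Int) (kk s : Nat) : ssum q kk s = Tk q (s + kk) - Tk q s := by
  induction kk with
  | zero => simp [ssum]
  | succ c ih =>
    simp only [ssum, List.range_succ, List.map_append, List.sum_append, List.map_cons,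
      List.map_nil, List.sum_cons, List.sum_nil] at *
    have : Tk q (s + (c + 1)) = Tk q (s + c) + gq q (s + c) := by
      show Tk q ((s + c) + 1) = _ ; rfl
    omega

lemma wgen_shift (q : List Int) (co : Int) (kk s : Nat) :
    wgen q (co + 1) kk s = wgen q co kk s - ssum q kk s := by
  unfold wgen ssum
  rw [← sum_map_sub]
  congr 1
  exact List.map_congr_left (fun t _ => by ring)

lemma wgen_snoc (q : List Int) (co : Int) (kk s : Nat) :
    wgen q co (kk + 1) s = wgen q co kk s + (2 * (kk : Int) - co) * gq q (s + kk) := by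
  simp [wgen, List.range_succ]

lemma ssum_snoc (q : List Int) (kk s : Nat) :
    ssum q (kk + 1) s = ssum q kk s + gq q (s + kk) := by
  simp [ssum, List.range_succ]

lemma wsum_succ (q : List Int) (kk s : Nat) :
    wsum q (kk + 1) s = wsum q kk s - ssum q kk s + (kk : Int) * gq q (s + kk) := by
  unfold wsum
  rw [show (((kk + 1 : Nat) : Int) - 1) = ((kk : Int) - 1) + 1 by push_cast; ring]
  rw [wgen_shift, wgen_snoc, ssum_snoc]
  ring

lemma slide_id (q : List Int) (kk m : Nat) :
    wsum q kk (m + 1) = wsum q kk m + (-2) * (Tk q (m + kk) - Tk q (m + 1))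
      + ((kk : Int) - 1) * (gq q (m + kk) + gq q m) := by
  induction kk with
  | zero =>
    have h1 : Tk q (m + 1) = Tk q m + gq q m := rfl
    simp [wsum, wgen, h1]; ring
  | succ c ih =>
    have e1 := wsum_succ q c (m + 1)
    have e2 := wsum_succ q c m
    have e3 := ssum_eq q c (m + 1)
    have e4 := ssum_eq q c m
    have h1 : Tk q (m + c + 1) = Tk q (m + c) + gq q (m + c) := rfl
    have h2 : Tk q (m + 1) = Tk q m + gq q m := rfl
    have hn1 : m + 1 + c = m + c + 1 := by omega
    have hn2 : m + (c + 1) = m + c + 1 := by omega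
    rw [hn1] at e1 e3
    rw [hn2]
    rw [e1, e2, ih, e3, e4, h1, h2]
    push_cast; ring

-- the prefix-sum build loop of A produces [Tk q 0, …, Tk q c]
lemma psfold (q : List Int) (c : Nat) :
    (PySem.List.pyRange 0 (c : Int) 1).foldl
      (fun ps i => ps ++ [PySem.List.pyGetD ps i 0 + PySem.List.pyGetD q i 0]) [0]
    = (List.range (c + 1)).map (Tk q) := by
  induction c with
  | zero => simp [PySem.List.pyRange_one_eq_nil, Tk]
  | succ c ih =>
    have hc : ((c : Int) + 1) = ((c + 1 : Nat) : Int) := by push_cast; ring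
    rw [show ((c + 1 : Nat) : Int) = (c : Int) + 1 by push_cast; ring,
      PySem.List.pyRange_one_succ_right (by omega), List.foldl_append, ih]
    simp only [List.foldl_cons, List.foldl_nil]
    have hget : PySem.List.pyGetD ((List.range (c + 1)).map (Tk q)) (c : Int) 0 = Tk q c := by
      rw [PySem.List.pyGetD_natCast]
      simp [List.getD, Nat.lt_succ_self]
    rw [hget, PySem.List.pyGetD_natCast]
    rw [List.range_succ (n := c + 1), List.map_append]
    have : Tk q (c + 1) = Tk q c + gq q c := rfl
    simp [this, gq]

-- the dp loop of A computes the initial window's weighted sum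
lemma dpfold (q : List Int) (c : Nat) :
    (PySem.List.pyRange 1 (1 + (c : Int)) 1).foldl
      (fun rd j =>
        (rd.1 + (rd.2 + j * (PySem.List.pyGetD q j 0 - PySem.List.pyGetD q (j - 1) 0)),
         rd.2 + j * (PySem.List.pyGetD q j 0 - PySem.List.pyGetD q (j - 1) 0))) ((0 : Int), (0 : Int))
    = (wsum q (c + 1) 0, (c : Int) * gq q c - Tk q c) := by
  induction c with
  | zero =>
    simp [PySem.List.pyRange_one_eq_nil, wsum, wgen, Tk]
  | succ c ih =>
    rw [show (1 + ((c + 1 : Nat) : Int)) = (1 + (c : Int)) + 1 by push_cast; ring,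
      PySem.List.pyRange_one_succ_right (by omega), List.foldl_append, ih]
    simp only [List.foldl_cons, List.foldl_nil]
    have h1 : PySem.List.pyGetD q (1 + (c : Int)) 0 = gq q (c + 1) := by
      rw [show (1 + (c : Int)) = ((c + 1 : Nat) : Int) by push_cast; ring,
        PySem.List.pyGetD_natCast]; rfl
    have h2 : PySem.List.pyGetD q (1 + (c : Int) - 1) 0 = gq q c := by
      rw [show (1 + (c : Int) - 1) = ((c : Nat) : Int) by omega,
        PySem.List.pyGetD_natCast]; rfl
    rw [h1, h2]
    have hT : Tk q (c + 1) = Tk q c + gq q c := rfl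
    have hw : wsum q (c + 1 + 1) 0 = wsum q (c + 1) 0 - ssum q (c + 1) 0 + ((c + 1 : Nat) : Int) * gq q (c + 1) := by
      simpa using wsum_succ q (c + 1) 0
    have hs : ssum q (c + 1) 0 = Tk q (c + 1) := by simpa [Tk] using ssum_eq q (c + 1) 0
    refine Prod.ext ?_ ?_ <;> simp only
    · rw [hw, hs, hT]; push_cast; ring
    · rw [hT]; push_cast; ring

lemma dpres1 (q : List Int) (kk : Nat) :
    ((PySem.List.pyRange 1 ((kk : Nat) : Int) 1).foldl
      (fun rd j =>
        (rd.1 + (rd.2 + j * (PySem.List.pyGetD q j 0 - PySem.List.pyGetD q (j - 1) 0)),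
         rd.2 + j * (PySem.List.pyGetD q j 0 - PySem.List.pyGetD q (j - 1) 0))) ((0 : Int), (0 : Int))).1
    = wsum q kk 0 := by
  cases kk with
  | zero => simp [PySem.List.pyRange_one_eq_nil, wsum, wgen]
  | succ c =>
    rw [show (((c + 1 : Nat) : Nat) : Int) = 1 + (c : Int) by push_cast; ring, dpfold]

-- the sliding loop of A computes the running minimum of the window sums
lemma slidefold (q : List Int) (kk : Nat) (c : Nat) (hc : c + kk ≤ q.length) :
    (PySem.List.pyRange 1 (1 + (c : Int)) 1).foldl
      (fun rp i =>
        (min rp.1 (rp.2 + (-2) * (PySem.List.pyGetD ((List.range (q.length + 1)).map (Tk q)) (i + (kk : Int) - 1) 0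
              - PySem.List.pyGetD ((List.range (q.length + 1)).map (Tk q)) i 0)
          + ((kk : Int) - 1) * (PySem.List.pyGetD q (i + (kk : Int) - 1) 0 + PySem.List.pyGetD q (i - 1) 0)),
         rp.2 + (-2) * (PySem.List.pyGetD ((List.range (q.length + 1)).map (Tk q)) (i + (kk : Int) - 1) 0
              - PySem.List.pyGetD ((List.range (q.length + 1)).map (Tk q)) i 0)
          + ((kk : Int) - 1) * (PySem.List.pyGetD q (i + (kk : Int) - 1) 0 + PySem.List.pyGetD q (i - 1) 0)))
      (wsum q kk 0, wsum q kk 0)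
    = (((List.range c).map (fun i => wsum q kk (i + 1))).foldl min (wsum q kk 0), wsum q kk c) := by
  induction c with
  | zero => simp [PySem.List.pyRange_one_eq_nil]
  | succ c ih =>
    have hc' : c + kk ≤ q.length := by omega
    rw [show (1 + ((c + 1 : Nat) : Int)) = (1 + (c : Int)) + 1 by push_cast; ring,
      PySem.List.pyRange_one_succ_right (by omega), List.foldl_append, ih hc']
    simp only [List.foldl_cons, List.foldl_nil]
    have hgetT : ∀ m : Nat, m ≤ q.length →
        PySem.List.pyGetD ((List.range (q.length + 1)).map (Tk q)) (m : Int) 0 = Tk q m := by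
      intro m hm
      rw [PySem.List.pyGetD_natCast]
      simp [List.getD, Nat.lt_succ_of_le hm]
    have e1 : (1 + (c : Int)) + (kk : Int) - 1 = ((c + kk : Nat) : Int) := by push_cast; ring
    have e2 : (1 + (c : Int)) = ((c + 1 : Nat) : Int) := by push_cast; ring
    have e3 : (1 + (c : Int)) - 1 = ((c : Nat) : Int) := by omega
    rw [e1, e3]
    rw [show PySem.List.pyGetD ((List.range (q.length + 1)).map (Tk q)) (1 + (c : Int)) 0
        = Tk q (c + 1) by rw [e2]; exact hgetT _ (by omega)]
    rw [hgetT (c + kk) (by omega)]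
    rw [PySem.List.pyGetD_natCast, PySem.List.pyGetD_natCast]
    have hprev : wsum q kk c + (-2) * (Tk q (c + kk) - Tk q (c + 1))
        + ((kk : Int) - 1) * (q.getD (c + kk) 0 + q.getD c 0) = wsum q kk (c + 1) := by
      rw [slide_id q kk c]; rfl
    refine Prod.ext ?_ ?_ <;> simp only
    · rw [hprev, List.range_succ, List.map_append, List.foldl_append]; rfl
    · rw [hprev]

-- index-weighted prefix sums: Uk q i = sum of j*q[j] for j < i
def Uk (q : List Int) : Nat → Int
  | 0 => 0
  | i + 1 => Uk q i + (i : Int) * gq q i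

-- B's build loop produces the two prefix-sum tables
lemma pqfold (q : List Int) (c : Nat) :
    (PySem.List.pyRange 0 (c : Int) 1).foldl
      (fun pq i =>
        (pq.1 ++ [PySem.List.pyGetD pq.1 (-1) 0 + PySem.List.pyGetD q i 0],
         pq.2 ++ [PySem.List.pyGetD pq.2 (-1) 0 + i * PySem.List.pyGetD q i 0])) (([0], [0]) : List Int × List Int)
    = ((List.range (c + 1)).map (Tk q), (List.range (c + 1)).map (Uk q)) := by
  induction c with
  | zero => simp [PySem.List.pyRange_one_eq_nil, Tk, Uk]
  | succ c ih =>
    rw [show ((c + 1 : Nat) : Int) = (c : Int) + 1 by push_cast; ring,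
      PySem.List.pyRange_one_succ_right (by omega), List.foldl_append, ih]
    simp only [List.foldl_cons, List.foldl_nil]
    rw [List.range_succ (n := c), List.map_append, List.map_append,
      List.map_cons, List.map_nil, List.map_cons, List.map_nil]
    rw [PySem.List.pyGetD_neg_one_append_singleton, PySem.List.pyGetD_neg_one_append_singleton,
      PySem.List.pyGetD_natCast]
    rw [List.range_succ (n := c + 1), List.map_append, List.map_append, List.range_succ (n := c),
      List.map_append, List.map_append]
    have hT : Tk q (c + 1) = Tk q c + gq q c := rfl
    have hU : Uk q (c + 1) = Uk q c + (c : Int) * gq q c := rfl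
    simp [hT, hU, gq]

lemma wgen_closed (q : List Int) (co : Int) (kk s : Nat) :
    wgen q co kk s = 2 * (Uk q (s + kk) - Uk q s)
      - (2 * (s : Int) + co) * (Tk q (s + kk) - Tk q s) := by
  induction kk with
  | zero => simp [wgen]
  | succ c ih =>
    rw [wgen_snoc, ih]
    have hU : Uk q (s + (c + 1)) = Uk q (s + c) + ((s + c : Nat) : Int) * gq q (s + c) := by
      show Uk q ((s + c) + 1) = _ ; rfl
    have hT : Tk q (s + (c + 1)) = Tk q (s + c) + gq q (s + c) := by
      show Tk q ((s + c) + 1) = _ ; rfl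
    rw [hU, hT]; push_cast; ring

-- the closed form B evaluates per window equals the weighted window sum
lemma wsum_closed (q : List Int) (kk s : Nat) :
    wsum q kk s = 2 * (Uk q (s + kk) - Uk q s)
      - (2 * (s : Int) + (kk : Int) - 1) * (Tk q (s + kk) - Tk q s) := by
  rw [wsum, wgen_closed]; ring

-- B's outer loop computes the minimum over all window starts
lemma bOuter (q : List Int) (kk : Nat) (c : Nat) (hc : c + kk ≤ q.length) :
    (PySem.List.pyRange 0 ((c + 1 : Nat) : Int) 1).foldl
      (fun best s =>
        match best with
        | none => some (2 * (PySem.List.pyGetD ((List.range (q.length + 1)).map (Uk q)) (s + (kk : Int)) 0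
              - PySem.List.pyGetD ((List.range (q.length + 1)).map (Uk q)) s 0)
            - (2 * s + (kk : Int) - 1) * (PySem.List.pyGetD ((List.range (q.length + 1)).map (Tk q)) (s + (kk : Int)) 0
              - PySem.List.pyGetD ((List.range (q.length + 1)).map (Tk q)) s 0))
        | some b => some (if (2 * (PySem.List.pyGetD ((List.range (q.length + 1)).map (Uk q)) (s + (kk : Int)) 0
              - PySem.List.pyGetD ((List.range (q.length + 1)).map (Uk q)) s 0)
            - (2 * s + (kk : Int) - 1) * (PySem.List.pyGetD ((List.range (q.length + 1)).map (Tk q)) (s + (kk : Int)) 0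
              - PySem.List.pyGetD ((List.range (q.length + 1)).map (Tk q)) s 0)) < b
            then (2 * (PySem.List.pyGetD ((List.range (q.length + 1)).map (Uk q)) (s + (kk : Int)) 0
              - PySem.List.pyGetD ((List.range (q.length + 1)).map (Uk q)) s 0)
            - (2 * s + (kk : Int) - 1) * (PySem.List.pyGetD ((List.range (q.length + 1)).map (Tk q)) (s + (kk : Int)) 0
              - PySem.List.pyGetD ((List.range (q.length + 1)).map (Tk q)) s 0)) else b)) none
    = some (((List.range c).map (fun i => wsum q kk (i + 1))).foldl min (wsum q kk 0)) := by
  have hgetU : ∀ m : Nat, m ≤ q.length →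
      PySem.List.pyGetD ((List.range (q.length + 1)).map (Uk q)) (m : Int) 0 = Uk q m := by
    intro m hm
    rw [PySem.List.pyGetD_natCast]
    simp [List.getD, Nat.lt_succ_of_le hm]
  have hgetT : ∀ m : Nat, m ≤ q.length →
      PySem.List.pyGetD ((List.range (q.length + 1)).map (Tk q)) (m : Int) 0 = Tk q m := by
    intro m hm
    rw [PySem.List.pyGetD_natCast]
    simp [List.getD, Nat.lt_succ_of_le hm]
  have uval : ∀ m : Nat, m + kk ≤ q.length →
      2 * (PySem.List.pyGetD ((List.range (q.length + 1)).map (Uk q)) ((m : Int) + (kk : Int)) 0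
          - PySem.List.pyGetD ((List.range (q.length + 1)).map (Uk q)) (m : Int) 0)
        - (2 * (m : Int) + (kk : Int) - 1) * (PySem.List.pyGetD ((List.range (q.length + 1)).map (Tk q)) ((m : Int) + (kk : Int)) 0
          - PySem.List.pyGetD ((List.range (q.length + 1)).map (Tk q)) (m : Int) 0)
      = wsum q kk m := by
    intro m hm
    rw [show ((m : Int) + (kk : Int)) = ((m + kk : Nat) : Int) by push_cast; ring]
    rw [hgetU (m + kk) (by omega), hgetU m (by omega), hgetT (m + kk) (by omega), hgetT m (by omega)]
    rw [wsum_closed]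
  induction c with
  | zero =>
    rw [show ((0 + 1 : Nat) : Int) = (0 : Int) + 1 by norm_num,
      PySem.List.pyRange_one_succ_right (by omega),
      PySem.List.pyRange_one_eq_nil (a := 0) (b := 0) (by omega)]
    simp only [List.nil_append, List.foldl_cons, List.foldl_nil]
    have h0 := uval 0 (by omega)
    simp only [Nat.cast_zero] at h0
    rw [h0]
    simp
  | succ c ih =>
    rw [show ((c + 1 + 1 : Nat) : Int) = ((c + 1 : Nat) : Int) + 1 by push_cast; ring,
      PySem.List.pyRange_one_succ_right (by omega), List.foldl_append, ih (by omega)]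
    simp only [List.foldl_cons, List.foldl_nil]
    rw [uval (c + 1) (by omega)]
    have hm : ∀ u m : Int, (if u < m then u else m) = min m u := by
      intro u m
      rcases lt_or_ge u m with h | h
      · rw [if_pos h, min_eq_right (le_of_lt h)]
      · rw [if_neg (not_lt.mpr h), min_eq_left h]
    rw [List.range_succ, List.map_append, List.foldl_append]
    simp only [List.map_cons, List.map_nil, List.foldl_cons, List.foldl_nil, hm]

-- ===== VERDICT (by name: the statement is the Claim_ definition above) =====
theorem angryChildren_spec : Claim_equal_angryChildren := by
  intro k packets _ hp
  rcases hp with ⟨h0, hcase⟩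
  obtain ⟨kk, rfl⟩ : ∃ kk : Nat, k = (kk : Int) := ⟨k.toNat, (Int.toNat_of_nonneg h0).symm⟩
  show angryChildren (kk : Int) packets = angryChildren_alt (kk : Int) packets
  by_cases hkn : (kk : Int) ≤ (packets.length : Int)
  · have hkl : kk ≤ packets.length := by exact_mod_cast hkn
    simp only [angryChildren, angryChildren_alt]
    generalize hq : PySem.List.sorted packets (fun x => x) false = q
    have hlen : q.length = packets.length := by rw [← hq]; exact PySem.List.length_sorted packets (fun x => x) false
    have hkq : kk ≤ q.length := by omega
    rw [psfold q q.length, dpres1 q kk, pqfold q q.length]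
    rw [show ((q.length : Int) - (kk : Int) + 1) = 1 + ((q.length - kk : Nat) : Int) by omega]
    rw [slidefold q kk (q.length - kk) (by omega)]
    rw [show (1 + ((q.length - kk : Nat) : Int)) = (((q.length - kk) + 1 : Nat) : Int) by push_cast; ring]
    rw [bOuter q kk (q.length - kk) (by omega)]
  · rcases hcase with h1 | ⟨h2, h3⟩
    · omega
    · subst h3
      have : kk = 1 := by exact_mod_cast h2
      subst this
      decide
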